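-- pv_equiv track=rewrite | github.com/shankar7791/MI-10-DevOps | Personel/Nilesh/python/Practice/9March/program4.py | count
-- ===== SOURCE A (Python) =====
-- def count(str):
--     counts = dict()
--     words = str.split()
--
--     for word in words:
--         if word in counts:
--             counts[word] += 1
--         else:
--             counts[word] = 1
--
--     return counts
-- ===== SOURCE B (Python) =====
-- def count(str):
--     words = str.split()
--     return {w: words.count(w) for w in dict.fromkeys(words)}
-- ===== Notes on version B (the rewrite author's own statement) =====
-- stated objective: alternative
-- what changed: Replaces the single accumulating dict-update loop by a dict comprehension over the first-occurrence-distinct words, counting each word with a repeated words.count scan.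
import Mathlib
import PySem

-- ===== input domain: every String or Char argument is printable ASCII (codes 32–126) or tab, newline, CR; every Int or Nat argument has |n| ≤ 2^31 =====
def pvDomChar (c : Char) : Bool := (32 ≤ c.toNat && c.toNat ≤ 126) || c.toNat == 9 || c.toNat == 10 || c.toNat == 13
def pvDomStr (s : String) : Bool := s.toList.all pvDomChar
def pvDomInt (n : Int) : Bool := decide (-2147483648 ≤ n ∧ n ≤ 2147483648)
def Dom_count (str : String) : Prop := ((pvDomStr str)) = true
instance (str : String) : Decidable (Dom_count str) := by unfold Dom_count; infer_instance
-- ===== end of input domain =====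

-- ===== PORT A =====
def count (str : String) : List (String × Int) :=
  let words := PySem.Str.split₀ str
  let counts := words.foldl (fun (counts : PySem.Dict String Int) word =>
    if counts.contains word then counts.insert word (counts.getD word 0 + 1)
    else counts.insert word 1) PySem.Dict.empty
  counts.items

-- ===== PORT B =====
def count_alt (str : String) : List (String × Int) :=
  let words := PySem.Str.split₀ str
  (PySem.List.dedup words).map (fun w => (w, (words.count w : Int)))

-- ===== PRECONDITION & SPEC =====
def Spec_count (str : String) (out : List (String × Int)) : Prop := out = count_alt str
instance (str : String) (out : List (String × Int)) : Decidable (Spec_count str out) := by unfold Spec_count; infer_instance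

-- ===== CLAIM (what is proved, stated in full; the proofs are below) =====
def Claim_equal_count : Prop := ∀ (str : String), Dom_count str → Spec_count str (count str)

-- ===== LEMMAS AND PROOFS =====

-- ===== VERDICT (by name: the statement is the Claim_ definition above) =====
lemma count_step_eq (words : List String) :
    words.foldl (fun (counts : PySem.Dict String Int) word =>
      if counts.contains word then counts.insert word (counts.getD word 0 + 1)
      else counts.insert word 1) PySem.Dict.empty
    = words.foldl (fun (d : PySem.Dict String Int) x => d.insert x (d.getD x 0 + 1)) PySem.Dict.empty := by
  apply PySem.List.foldl_congr_mem
  intro d x _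
  by_cases h : d.contains x = true
  · simp [h]
  · rw [PySem.Dict.getD_of_not_contains _ _ (by simpa using h)]
    simp [h]

theorem count_spec : Claim_equal_count := by
  intro s _
  unfold Spec_count count count_alt
  simp only [count_step_eq, PySem.Dict.foldl_insert_getD_add_one_eq_counter,
    PySem.Dict.items_counter, PySem.List.dedup_eq_ofList]
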